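-- pv_equiv track=rewrite | github.com/LimHaksu/algorithm | programmers/python/2019_카카오_개발자_겨울_인턴십/5.py | solution
-- ===== SOURCE A (Python) =====
-- inf = 200_000_000
--
-- def solution(stones, k):
--     answer = 0
--     arr = [inf, *stones, inf]
--     left = 1
--     right = inf
--     while left <= right:
--         mid = (left + right) // 2
--         if is_valid(arr, mid, k):
--             answer = max(answer, mid)
--             left = mid + 1
--         else:
--             right = mid - 1
--     return answer
--
-- def is_valid(arr, h, k):
--     index = 0
--     while index < len(arr):
--         count = 1
--         while count <= k and index + count < len(arr):
--             if arr[index + count] >= h: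
--                 index += count
--                 break
--             count += 1
--         if count > k:
--             return False
--         if index == len(arr)-1:
--             break
--     return index == len(arr)-1
-- ===== SOURCE B (Python) =====
-- inf = 200_000_000
--
-- def solution(stones, k):
--     # Crossable height h requires every k consecutive stones to contain one >= h,
--     # so the answer is the minimum over all k-windows of the window maximum,
--     # clamped to the searched height range [0, inf].
--     if k <= 0:
--         return 0  # no jump is possible at all
--     best = inf
--     for i in range(len(stones) - k + 1):
--         best = min(best, max(stones[i:i+k]))
--     return max(0, best)
-- ===== Notes on version B (the rewrite author's own statement) =====
-- stated objective: alternative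
-- what changed: Replaces A's binary search on the height plus a greedy jump-simulation feasibility check by a direct computation: the answer is the minimum over all k-windows of the window maximum, clamped to A's searched range [0, 200_000_000].
import Mathlib
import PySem

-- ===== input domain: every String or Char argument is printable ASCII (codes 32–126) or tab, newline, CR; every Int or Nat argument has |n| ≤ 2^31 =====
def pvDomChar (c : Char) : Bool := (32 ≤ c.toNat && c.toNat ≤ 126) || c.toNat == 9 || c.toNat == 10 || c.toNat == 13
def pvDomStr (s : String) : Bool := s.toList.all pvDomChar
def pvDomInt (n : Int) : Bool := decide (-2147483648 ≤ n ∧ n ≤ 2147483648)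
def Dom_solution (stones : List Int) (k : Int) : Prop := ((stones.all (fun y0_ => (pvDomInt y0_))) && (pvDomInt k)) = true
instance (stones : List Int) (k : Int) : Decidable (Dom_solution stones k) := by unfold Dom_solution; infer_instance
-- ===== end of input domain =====

-- B replaces A's binary search + greedy feasibility simulation by a direct
-- min-over-windows-of-window-max computation; return values agree on all inputs.

-- ===== PORT A =====
def pvInf : Int := 200000000

-- inner `while count <= k and index + count < len(arr)` loop of is_valid;
-- returns the (index, count) state at loop exit / break.
-- (structural fuel: the loop runs while count <= k, so (k - count + 1).toNat
-- iterations always suffice and the port is exact; reachable states always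
-- have index + count >= 0, so `.toNat` indexing is exact)
def isValidInnerGo (arr : List Int) (h k : Int) (index : Int) : Nat → Int → Int × Int
  | 0, count => (index, count)
  | fuel + 1, count =>
    if count ≤ k ∧ index + count < (arr.length : Int) then
      if h ≤ arr.getD (index + count).toNat 0 then (index + count, count)
      else isValidInnerGo arr h k index fuel (count + 1)
    else (index, count)

def isValidInner (arr : List Int) (h k : Int) (index : Int) (count : Int) : Int × Int :=
  isValidInnerGo arr h k index (k - count + 1).toNat count

-- outer `while index < len(arr)` loop of is_valid; Python diverges when the loop
-- makes no progress (unreachable from solution, where h ≤ pvInf = arr's sentinel),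
-- so the port carries fuel and returns false on exhaustion.
def isValidOuter (arr : List Int) (h k : Int) : Nat → Int → Bool
  | 0, _ => false
  | fuel+1, index =>
    if index < (arr.length : Int) then
      let p := isValidInner arr h k index 1
      if k < p.2 then false
      else if p.1 = (arr.length : Int) - 1 then true
      else isValidOuter arr h k fuel p.1
    else decide (index = (arr.length : Int) - 1)

def isValid (arr : List Int) (h k : Int) : Bool :=
  isValidOuter arr h k (arr.length + 1) 0

-- the `while left <= right` binary-search loop of solution; each iteration at
-- least halves the interval, so fuel with 2^fuel > right - left + 1 is exact
-- (solution searches [1, 200_000_000] and passes fuel 31, 2^31 > 2*10^8).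
def bsearchLoop (arr : List Int) (k : Int) : Nat → Int → Int → Int → Int
  | 0, answer, _, _ => answer
  | fuel + 1, answer, left, right =>
    if left ≤ right then
      let mid := PySem.Int.floordiv (left + right) 2
      if isValid arr mid k then bsearchLoop arr k fuel (max answer mid) (mid + 1) right
      else bsearchLoop arr k fuel answer left (mid - 1)
    else answer

def solution (stones : List Int) (k : Int) : Int :=
  bsearchLoop (pvInf :: (stones ++ [pvInf])) k 31 0 1 pvInf

-- ===== PORT B =====
-- the `for i in range(...)` accumulation of Source B: min over all k-windows of the window max
def pvBest (stones : List Int) (k : Int) : Int :=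
  (PySem.List.pyRange 0 ((stones.length : Int) - k + 1) 1).foldl
    (fun best i =>
      min best ((PySem.List.max? (PySem.List.slice stones (some i) (some (i + k))) (fun y => y)).getD 0))
    pvInf

def solution_alt (stones : List Int) (k : Int) : Int :=
  if k ≤ 0 then 0
  else max 0 (pvBest stones k)

-- ===== PRECONDITION & SPEC =====
def Spec_solution (stones : List Int) (k : Int) (out : Int) : Prop := out = solution_alt stones k
instance (stones : List Int) (k : Int) (out : Int) : Decidable (Spec_solution stones k out) := by unfold Spec_solution; infer_instance

-- ===== CLAIM (what is proved, stated in full; the proofs are below) =====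
def Claim_equal_solution : Prop := ∀ (stones : List Int) (k : Int), Dom_solution stones k → Spec_solution stones k (solution stones k)

-- ===== LEMMAS AND PROOFS =====

-- "from position p, every window of k consecutive stones ahead contains one ≥ h"
def GoodFrom (arr : List Int) (h k : Int) (p : Int) : Prop :=
  ∀ q : Int, p ≤ q → q + k ≤ (arr.length : Int) - 1 →
    ∃ r : Int, q < r ∧ r ≤ q + k ∧ h ≤ arr.getD r.toNat 0

theorem isValidInnerGo_char (arr : List Int) (h k index : Int) :
    ∀ (fuel : Nat) (count : Int), 1 ≤ count → k < count + (fuel : Int) →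
    ((∃ r : Int, index + count ≤ r ∧ r ≤ index + k ∧ r < (arr.length : Int) ∧
        h ≤ arr.getD r.toNat 0 ∧ isValidInnerGo arr h k index fuel count = (r, r - index))
    ∨ ((∀ r : Int, index + count ≤ r → r ≤ index + k → r < (arr.length : Int) →
          ¬ h ≤ arr.getD r.toNat 0) ∧
        isValidInnerGo arr h k index fuel count
          = (index, max count (min (k + 1) ((arr.length : Int) - index))))) := by
  intro fuel
  induction fuel with
  | zero =>
    intro count hc1 hf
    exact Or.inr ⟨fun r hr1 hr2 hr3 _ => by omega, by rw [isValidInnerGo]; congr 1; omega⟩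
  | succ m ih =>
    intro count hc1 hf
    rw [isValidInnerGo]
    by_cases hc : count ≤ k ∧ index + count < (arr.length : Int)
    · rw [if_pos hc]
      by_cases hfound : h ≤ arr.getD (index + count).toNat 0
      · rw [if_pos hfound]
        exact Or.inl ⟨index + count, le_refl _, by omega, hc.2, hfound, by congr 1; omega⟩
      · rw [if_neg hfound]
        rcases ih (count + 1) (by omega) (by omega) with ⟨r, h1, h2, h3, h4, h5⟩ | ⟨hall, heq⟩
        · exact Or.inl ⟨r, by omega, h2, h3, h4, h5⟩
        · refine Or.inr ⟨fun r hr1 hr2 hr3 => ?_, by rw [heq]; congr 1; omega⟩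
          rcases eq_or_lt_of_le hr1 with rfl | hlt
          · exact hfound
          · exact hall r (by omega) hr2 hr3
    · rw [if_neg hc]
      exact Or.inr ⟨fun r hr1 hr2 hr3 _ => hc ⟨by omega, by omega⟩, by congr 1; omega⟩

theorem isValidInner_char (arr : List Int) (h k : Int) (index count : Int)
    (hc1 : 1 ≤ count) :
    (∃ r : Int, index + count ≤ r ∧ r ≤ index + k ∧ r < (arr.length : Int) ∧
        h ≤ arr.getD r.toNat 0 ∧ isValidInner arr h k index count = (r, r - index))
    ∨ ((∀ r : Int, index + count ≤ r → r ≤ index + k → r < (arr.length : Int) →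
          ¬ h ≤ arr.getD r.toNat 0) ∧
        isValidInner arr h k index count
          = (index, max count (min (k + 1) ((arr.length : Int) - index)))) :=
  isValidInnerGo_char arr h k index (k - count + 1).toNat count hc1 (by omega)

theorem isValidOuter_good (arr : List Int) (h k : Int)
    (hk : 1 ≤ k) (hlast : h ≤ arr.getD (arr.length - 1) 0) (hL : 2 ≤ arr.length) :
    ∀ (fuel : Nat) (index : Int), 0 ≤ index → index ≤ (arr.length : Int) - 1 →
      ((arr.length : Int) - 1 - index).toNat < fuel →
      (isValidOuter arr h k fuel index = true ↔ GoodFrom arr h k index) := by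
  have hlastI : h ≤ arr.getD (((arr.length : Int) - 1)).toNat 0 := by
    have hco : (((arr.length : Int) - 1)).toNat = arr.length - 1 := by omega
    rw [hco]; exact hlast
  intro fuel
  induction fuel with
  | zero => intro index _ _ hf; omega
  | succ m ih =>
    intro index h0 hle hf
    rw [isValidOuter]
    rw [if_pos (by omega : index < (arr.length : Int))]
    rcases isValidInner_char arr h k index 1 (le_refl 1) with ⟨r, h1, h2, h3, h4, heq⟩ | ⟨hall, heq⟩
    · simp only [heq]
      rw [if_neg (by omega : ¬ k < r - index)]
      by_cases hr : r = (arr.length : Int) - 1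
      · rw [if_pos hr]
        refine iff_of_true rfl ?_
        intro q hq1 hq2
        exact ⟨(arr.length : Int) - 1, by omega, by omega, hlastI⟩
      · rw [if_neg hr]
        rw [ih r (by omega) (by omega) (by omega)]
        constructor
        · intro hg q hq1 hq2
          by_cases hqr : r ≤ q
          · exact hg q hqr hq2
          · exact ⟨r, by omega, by omega, h4⟩
        · intro hg q hq1 hq2
          exact hg q (by omega) hq2
    · simp only [heq]
      by_cases hidx : index = (arr.length : Int) - 1
      · rw [if_neg (by omega : ¬ k < max 1 (min (k + 1) ((arr.length : Int) - index)))]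
        rw [if_pos hidx]
        refine iff_of_true rfl ?_
        intro q hq1 hq2
        omega
      · have hfar : index + k < (arr.length : Int) - 1 := by
          by_contra hcon
          exact hall ((arr.length : Int) - 1) (by omega) (by omega) (by omega) hlastI
        rw [if_pos (by omega : k < max 1 (min (k + 1) ((arr.length : Int) - index)))]
        refine iff_of_false (by simp) ?_
        intro hg
        obtain ⟨r, hr1, hr2, hr3⟩ := hg index (le_refl _) (by omega)
        exact hall r (by omega) (by omega) (by omega) hr3

-- windows over the raw stones list
def Windows (stones : List Int) (h k : Int) : Prop :=
  ∀ i : Int, 0 ≤ i → i + k ≤ (stones.length : Int) →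
    ∃ j : Int, i ≤ j ∧ j < i + k ∧ h ≤ stones.getD j.toNat 0

theorem good_iff_windows (stones : List Int) (h k : Int) (hk : 1 ≤ k) (hh : h ≤ pvInf) :
    GoodFrom (pvInf :: (stones ++ [pvInf])) h k 0 ↔ Windows stones h k := by
  have harr_len : (pvInf :: (stones ++ [pvInf])).length = stones.length + 2 := by simp
  have hget : ∀ r : Int, 1 ≤ r → r ≤ (stones.length : Int) →
      (pvInf :: (stones ++ [pvInf])).getD r.toNat 0 = stones.getD (r - 1).toNat 0 := by
    intro r hr1 hr2
    have hco : r.toNat = (r - 1).toNat + 1 := by omega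
    rw [hco, List.getD_cons_succ]
    exact List.getD_append _ _ _ _ (by omega)
  have hsent : (pvInf :: (stones ++ [pvInf])).getD (stones.length + 1) 0 = pvInf := by
    rw [List.getD_cons_succ, List.getD_append_right _ _ _ _ (le_refl _)]
    simp
  constructor
  · intro hg i hi0 hik
    obtain ⟨r, hr1, hr2, hr3⟩ := hg i (by omega) (by omega)
    refine ⟨r - 1, by omega, by omega, ?_⟩
    rw [← hget r (by omega) (by omega)]
    exact hr3
  · intro hw q hq0 hqk
    rw [harr_len] at hqk
    push_cast at hqk
    by_cases hend : q + k ≤ (stones.length : Int)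
    · obtain ⟨j, hj1, hj2, hj3⟩ := hw q hq0 hend
      refine ⟨j + 1, by omega, by omega, ?_⟩
      rw [hget (j + 1) (by omega) (by omega)]
      have hco : (j + 1 - 1 : Int).toNat = j.toNat := by omega
      rw [hco]
      exact hj3
    · refine ⟨(stones.length : Int) + 1, by omega, by omega, ?_⟩
      have hco : ((stones.length : Int) + 1).toNat = stones.length + 1 := by omega
      rw [hco, hsent]
      exact hh

theorem isValid_eq (stones : List Int) (h k : Int) (hh : h ≤ pvInf) (hk : 1 ≤ k) :
    (isValid (pvInf :: (stones ++ [pvInf])) h k = true ↔ Windows stones h k) := by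
  have harr_len : (pvInf :: (stones ++ [pvInf])).length = stones.length + 2 := by simp
  have hsent : (pvInf :: (stones ++ [pvInf])).getD ((pvInf :: (stones ++ [pvInf])).length - 1) 0 = pvInf := by
    rw [harr_len]
    have : stones.length + 2 - 1 = stones.length + 1 := by omega
    rw [this, List.getD_cons_succ, List.getD_append_right _ _ _ _ (le_refl _)]
    simp
  rw [isValid,
    isValidOuter_good (pvInf :: (stones ++ [pvInf])) h k hk (by rw [hsent]; exact hh) (by omega)
      ((pvInf :: (stones ++ [pvInf])).length + 1) 0 (le_refl _) (by rw [harr_len]; push_cast; omega)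
      (by rw [harr_len]; push_cast; omega)]
  exact good_iff_windows stones h k hk hh

theorem isValid_false_of_k_nonpos (stones : List Int) (h k : Int) (hk : k ≤ 0) :
    isValid (pvInf :: (stones ++ [pvInf])) h k = false := by
  have harr_len : (pvInf :: (stones ++ [pvInf])).length = stones.length + 2 := by simp
  rw [isValid, isValidOuter]
  rw [if_pos (by rw [harr_len]; push_cast; omega : (0 : Int) < ((pvInf :: (stones ++ [pvInf])).length : Int))]
  rcases isValidInner_char (pvInf :: (stones ++ [pvInf])) h k 0 1 (le_refl 1) with
    ⟨r, h1, h2, _, _, _⟩ | ⟨_, heq⟩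
  · omega
  · simp only [heq]
    rw [if_pos (by rw [harr_len]; push_cast; omega :
      k < max 1 (min (k + 1) (((pvInf :: (stones ++ [pvInf])).length : Int) - 0)))]

theorem foldl_min_le (l : List Int) (f : Int → Int) (a : Int) :
    l.foldl (fun b i => min b (f i)) a ≤ a := by
  induction l generalizing a with
  | nil => simp
  | cons x t ih => exact le_trans (ih _) (by simp)

theorem le_foldl_min (l : List Int) (f : Int → Int) (a h : Int) :
    h ≤ l.foldl (fun b i => min b (f i)) a ↔ h ≤ a ∧ ∀ i ∈ l, h ≤ f i := by
  induction l generalizing a with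
  | nil => simp
  | cons x t ih =>
    simp only [List.foldl_cons, ih, List.mem_cons, le_min_iff]
    aesop

-- B's per-window value: h ≤ max(stones[i:i+k]) ↔ the window contains a stone ≥ h
theorem le_wmax_iff (stones : List Int) (h k i : Int)
    (hk : 1 ≤ k) (hi : 0 ≤ i) (hik : i + k ≤ (stones.length : Int)) :
    (h ≤ (PySem.List.max? (PySem.List.slice stones (some i) (some (i + k))) (fun y => y)).getD 0)
      ↔ ∃ j : Int, i ≤ j ∧ j < i + k ∧ h ≤ stones.getD j.toNat 0 := by
  have hslice : PySem.List.slice stones (some i) (some (i + k))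
      = (stones.drop i.toNat).take ((i + k).toNat - i.toNat) :=
    PySem.List.slice_toNat stones hi (by omega)
  have hkco : (i + k).toNat - i.toNat = k.toNat := by omega
  rw [hslice, hkco]
  have hlen : ((stones.drop i.toNat).take k.toNat).length = k.toNat := by
    rw [List.length_take, List.length_drop]; omega
  have hne : (stones.drop i.toNat).take k.toNat ≠ [] := by
    intro hc; rw [hc] at hlen; simp at hlen; omega
  obtain ⟨m, hm⟩ : ∃ m, PySem.List.max? ((stones.drop i.toNat).take k.toNat) (fun y => y) = some m := by
    rcases Option.eq_none_or_eq_some (PySem.List.max? ((stones.drop i.toNat).take k.toNat) (fun y => y)) with hc | hc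
    · exact absurd ((PySem.List.max?_eq_none_iff _ _).mp hc) hne
    · exact hc
  rw [hm]
  simp only [Option.getD_some]
  have hgetl : ∀ (nn : Nat) (hnn : nn < ((stones.drop i.toNat).take k.toNat).length),
      ((stones.drop i.toNat).take k.toNat)[nn] = stones.getD (i.toNat + nn) 0 := by
    intro nn hnn
    rw [List.getElem_take, List.getElem_drop]
    exact (List.getD_eq_getElem stones 0 (by rw [hlen] at hnn; omega)).symm
  constructor
  · intro hle
    obtain ⟨nn, hnn, hval⟩ := List.mem_iff_getElem.mp (PySem.List.max?_mem hm)
    refine ⟨((i.toNat + nn : Nat) : Int), by omega, by rw [hlen] at hnn; omega, ?_⟩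
    have hco : (((i.toNat + nn : Nat) : Int)).toNat = i.toNat + nn := by omega
    rw [hco, ← hgetl nn hnn, hval]
    exact hle
  · rintro ⟨j, hj1, hj2, hj3⟩
    have hnn : j.toNat - i.toNat < ((stones.drop i.toNat).take k.toNat).length := by
      rw [hlen]; omega
    have hval : ((stones.drop i.toNat).take k.toNat)[j.toNat - i.toNat] = stones.getD j.toNat 0 := by
      rw [hgetl _ hnn]; congr 1; omega
    have hmemj : stones.getD j.toNat 0 ∈ (stones.drop i.toNat).take k.toNat := by
      rw [← hval]; exact List.getElem_mem hnn
    have hle := PySem.List.max?_isMax hm _ hmemj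
    simp only [] at hle
    exact le_trans hj3 hle

theorem bsearchLoop_eq (arr : List Int) (k t : Int)
    (hP : ∀ h : Int, 1 ≤ h → h ≤ pvInf → (isValid arr h k = true ↔ h ≤ t)) :
    ∀ (fuel : Nat) (ans left right : Int), 1 ≤ left → right ≤ pvInf →
      (right - left + 1).toNat < 2 ^ fuel →
      bsearchLoop arr k fuel ans left right
        = if left ≤ t ∧ left ≤ right then max ans (min right t) else ans := by
  intro fuel
  induction fuel with
  | zero =>
    intro ans left right h1 hr hw
    rw [bsearchLoop, if_neg (by simp at hw; omega)]
  | succ m ih =>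
    intro ans left right h1 hr hw
    have hpow : (2 : Nat) ^ (m + 1) = 2 ^ m * 2 := pow_succ 2 m
    rw [bsearchLoop]
    by_cases hlr : left ≤ right
    · rw [if_pos hlr]
      have hmid := PySem.Int.floordiv_two_mid_bounds hlr
      have hm2 : PySem.Int.floordiv (left + right) 2 * 2 ≤ left + right ∧
          left + right < (PySem.Int.floordiv (left + right) 2 + 1) * 2 :=
        (PySem.Int.floordiv_eq_iff_of_pos (by omega)).mp rfl
      by_cases hvalid : isValid arr (PySem.Int.floordiv (left + right) 2) k = true
      · rw [if_pos hvalid]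
        have hmt : PySem.Int.floordiv (left + right) 2 ≤ t :=
          (hP _ (by omega) (by omega)).mp hvalid
        rw [ih _ _ _ (by omega) hr (by omega)]
        split_ifs <;> omega
      · rw [if_neg hvalid]
        have hmt : ¬ PySem.Int.floordiv (left + right) 2 ≤ t := by
          intro hc
          exact hvalid ((hP _ (by omega) (by omega)).mpr hc)
        rw [ih _ _ _ h1 (by omega) (by omega)]
        split_ifs <;> omega
    · rw [if_neg hlr, if_neg (by omega)]

-- ===== VERDICT (by name: the statement is the Claim_ definition above) =====
theorem solution_spec : Claim_equal_solution := by
  intro stones k _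
  unfold Spec_solution
  rw [solution, solution_alt]
  by_cases hk : k ≤ 0
  · rw [if_pos hk]
    rw [bsearchLoop_eq (pvInf :: (stones ++ [pvInf])) k 0
      (fun h h1 h2 => iff_of_false (by rw [isValid_false_of_k_nonpos stones h k hk]; simp) (by omega))
      31 0 1 pvInf (le_refl _) (le_refl _) (by norm_num [pvInf])]
    rw [if_neg (by omega)]
  · rw [if_neg hk]
    have hk1 : 1 ≤ k := by omega
    have hbest_le : pvBest stones k ≤ pvInf := foldl_min_le _ _ _
    have hP : ∀ h : Int, 1 ≤ h → h ≤ pvInf →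
        (isValid (pvInf :: (stones ++ [pvInf])) h k = true ↔ h ≤ pvBest stones k) := by
      intro h h1 h2
      rw [isValid_eq stones h k h2 hk1, pvBest, le_foldl_min]
      constructor
      · intro hw
        refine ⟨h2, fun i hi => ?_⟩
        rw [PySem.List.mem_pyRange_one] at hi
        rw [le_wmax_iff stones h k i hk1 hi.1 (by omega)]
        exact hw i hi.1 (by omega)
      · rintro ⟨_, hall⟩ i hi0 hik
        have hwi := hall i (PySem.List.mem_pyRange_one.mpr ⟨hi0, by omega⟩)
        rw [le_wmax_iff stones h k i hk1 hi0 hik] at hwi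
        exact hwi
    rw [bsearchLoop_eq (pvInf :: (stones ++ [pvInf])) k (pvBest stones k) hP 31 0 1 pvInf (le_refl _) (le_refl _) (by norm_num [pvInf])]
    split_ifs <;> omega
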